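-- pv_equiv track=rewrite | github.com/dfacoet/aoc-python | 2015/2015-16_solution.py | part1
-- ===== SOURCE A (Python) =====
-- real_sue = {
--     "children": 3,
--     "cats": 7,
--     "samoyeds": 2,
--     "pomeranians": 3,
--     "akitas": 0,
--     "vizslas": 0,
--     "goldfish": 5,
--     "trees": 3,
--     "cars": 2,
--     "perfumes": 1,
-- }
--
-- def part1(sues: dict[int, dict[str, int]]) -> int:
--     sues_left = sues.copy()
--     for key, value in real_sue.items():
--         not_real_sues = []
--         for n, sue in sues_left.items():
--             if key in sue and sue[key] != value:
--                 not_real_sues.append(n)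
--         for n in not_real_sues:
--             del sues_left[n]
--
--     # check only one left and return corresponding key
--     assert len(sues_left) == 1
--     return next(iter(sues_left))
-- ===== SOURCE B (Python) =====
-- real_sue = {
--     "children": 3,
--     "cats": 7,
--     "samoyeds": 2,
--     "pomeranians": 3,
--     "akitas": 0,
--     "vizslas": 0,
--     "goldfish": 5,
--     "trees": 3,
--     "cars": 2,
--     "perfumes": 1,
-- }
--
-- def part1(sues: dict[int, dict[str, int]]) -> int:
--     matches = [
--         n
--         for n, sue in sues.items()
--         if all(key not in sue or sue[key] == value for key, value in real_sue.items())
--     ]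
--     assert len(matches) == 1
--     return matches[0]
-- ===== Notes on version B (the rewrite author's own statement) =====
-- stated objective: simpler
-- what changed: Replaces A's attribute-major elimination (ten passes, each collecting keys of inconsistent sues and deleting them from a shrinking dict copy) with a single candidate-major pass that keeps each sue iff it is consistent with every known attribute, then returns the unique match.
import Mathlib
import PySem

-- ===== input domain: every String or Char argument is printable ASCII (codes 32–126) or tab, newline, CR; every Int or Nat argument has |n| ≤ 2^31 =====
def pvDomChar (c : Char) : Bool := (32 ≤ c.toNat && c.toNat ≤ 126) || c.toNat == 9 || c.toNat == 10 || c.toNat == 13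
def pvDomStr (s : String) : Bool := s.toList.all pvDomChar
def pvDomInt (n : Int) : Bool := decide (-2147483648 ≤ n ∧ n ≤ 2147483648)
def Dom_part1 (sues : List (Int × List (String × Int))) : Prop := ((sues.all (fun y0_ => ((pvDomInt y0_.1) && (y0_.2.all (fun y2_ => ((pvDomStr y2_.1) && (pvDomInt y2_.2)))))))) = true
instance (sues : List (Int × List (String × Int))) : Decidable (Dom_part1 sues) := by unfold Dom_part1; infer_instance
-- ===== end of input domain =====

-- B replaces A's attribute-major elimination over a shrinking dict copy with one
-- candidate-major pass keeping each sue iff it is consistent with every known attribute (simpler).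


-- ===== PORT A =====
-- module-level constant real_sue (shared context of both programs)
def realSue : List (String × Int) :=
  [("children", 3), ("cats", 7), ("samoyeds", 2), ("pomeranians", 3), ("akitas", 0),
   ("vizslas", 0), ("goldfish", 5), ("trees", 3), ("cars", 2), ("perfumes", 1)]

-- 'key in sue and sue[key] != value' (the guarded lookup rendered as a match on get?)
def badA (sue : List (String × Int)) (k : String) (v : Int) : Bool :=
  match (PySem.Dict.mk sue).get? k with
  | some w => w != v
  | none => false

-- one iteration of A's outer loop: collect keys of inconsistent sues, then delete each
def stepA (left : PySem.Dict Int (List (String × Int))) (kv : String × Int) :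
    PySem.Dict Int (List (String × Int)) :=
  let notReal := left.items.foldl
    (fun acc p => if badA p.2 kv.1 kv.2 then acc ++ [p.1] else acc) []
  notReal.foldl (fun l n => l.erase n) left

def part1 (sues : List (Int × List (String × Int))) : Int :=
  let suesLeft := realSue.foldl stepA (PySem.Dict.mk sues)
  -- assert len(sues_left) == 1; return next(iter(sues_left))  (Pre_ excludes the raising inputs)
  match suesLeft.items with
  | p :: _ => p.1
  | [] => 0

-- ===== PORT B =====
-- 'key not in sue or sue[key] == value'
def goodB (sue : List (String × Int)) (k : String) (v : Int) : Bool :=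
  !(PySem.Dict.mk sue).contains k || ((PySem.Dict.mk sue).get? k == some v)

def part1_alt (sues : List (Int × List (String × Int))) : Int :=
  let matchesL :=
    (sues.filter (fun p => realSue.all (fun kv => goodB p.2 kv.1 kv.2))).map (fun p => p.1)
  -- assert len(matches) == 1; return matches[0]  (Pre_ excludes the raising inputs)
  match matchesL with
  | n :: _ => n
  | [] => 0

-- ===== PRECONDITION & SPEC =====
-- Pre_ excludes (a) inputs on which A's 'assert len(sues_left) == 1' fails (AssertionError:
-- not exactly one consistent sue), and (b) association lists with a duplicated outer or inner
-- key, which do not represent a Python dict (the type A receives) at all.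
def Pre_part1 (sues : List (Int × List (String × Int))) : Prop :=
  (sues.map (fun p => p.1)).Nodup ∧
  (∀ p ∈ sues, (p.2.map (fun q => q.1)).Nodup) ∧
  sues.countP (fun p => realSue.all (fun kv => goodB p.2 kv.1 kv.2)) = 1
instance (sues : List (Int × List (String × Int))) : Decidable (Pre_part1 sues) := by
  unfold Pre_part1; infer_instance

def pvWitness_part1 : (List (Int × List (String × Int))) :=
  [(1, [("children", 3)]), (2, [("cats", 8)])]

def Spec_part1 (sues : List (Int × List (String × Int))) (out : Int) : Prop := out = part1_alt sues
instance (sues : List (Int × List (String × Int))) (out : Int) : Decidable (Spec_part1 sues out) := by unfold Spec_part1; infer_instance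

-- ===== CLAIM (what is proved, stated in full; the proofs are below) =====
def Claim_equal_part1 : Prop := ∀ (sues : List (Int × List (String × Int))), Dom_part1 sues → Pre_part1 sues → Spec_part1 sues (part1 sues)

-- ===== LEMMAS AND PROOFS =====

-- deleting each key in ns is filtering the items on those keys
theorem foldl_erase_items (ns : List Int) (d : PySem.Dict Int (List (String × Int))) :
    (ns.foldl (fun l n => l.erase n) d).items
      = d.items.filter (fun p => !ns.contains p.1) := by
  induction ns generalizing d with
  | nil => simp
  | cons n ns ih =>
    rw [List.foldl_cons, ih]
    simp only [PySem.Dict.erase, List.filter_filter]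
    apply List.filter_congr
    intro p _
    by_cases hpn : p.1 = n
    · simp [hpn]
    · simp [hpn, Bool.and_comm]

-- B's predicate is the negation of A's elimination test
theorem good_eq_not_bad (sue : List (String × Int)) (k : String) (v : Int) :
    goodB sue k v = !badA sue k v := by
  unfold goodB badA
  rw [PySem.Dict.contains_eq_isSome_get?]
  cases h : (PySem.Dict.mk sue).get? k <;> simp [bne]

-- one pass of A, on a dict with distinct keys, keeps exactly the consistent sues
theorem stepA_items (d : PySem.Dict Int (List (String × Int))) (kv : String × Int)
    (h : (d.items.map (fun p => p.1)).Nodup) :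
    (stepA d kv).items = d.items.filter (fun p => goodB p.2 kv.1 kv.2) := by
  unfold stepA
  rw [PySem.List.foldl_append_if, foldl_erase_items]
  apply List.filter_congr
  intro p hp
  rw [good_eq_not_bad]
  by_cases hb : badA p.2 kv.1 kv.2 = true
  · have : p.1 ∈ (List.filter (fun p => badA p.2 kv.1 kv.2) d.items).map (fun p => p.1) :=
      List.mem_map_of_mem (List.mem_filter.mpr ⟨hp, hb⟩)
    simp [this, hb]
  · have hnot : p.1 ∉ (List.filter (fun p => badA p.2 kv.1 kv.2) d.items).map (fun p => p.1) := by
      intro hmem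
      obtain ⟨q, hq, hq1⟩ := List.mem_map.mp hmem
      obtain ⟨hqd, hqb⟩ := List.mem_filter.mp hq
      have := List.inj_on_of_nodup_map h hqd hp hq1
      exact hb (this ▸ hqb)
    simp [hnot, hb]

theorem foldl_stepA (L : List (String × Int)) (d : PySem.Dict Int (List (String × Int)))
    (h : (d.items.map (fun p => p.1)).Nodup) :
    (L.foldl stepA d).items
      = d.items.filter (fun p => L.all (fun kv => goodB p.2 kv.1 kv.2)) := by
  induction L generalizing d with
  | nil => simp
  | cons kv L ih =>
    have hnd : (((stepA d kv).items).map (fun p => p.1)).Nodup := by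
      rw [stepA_items d kv h]
      exact List.Nodup.sublist (List.Sublist.map _ List.filter_sublist) h
    rw [List.foldl_cons, ih _ hnd, stepA_items d kv h, List.filter_filter]
    apply List.filter_congr
    intro p _
    simp [Bool.and_comm]

-- ===== VERDICT (by name: the statement is the Claim_ definition above) =====
theorem part1_spec : Claim_equal_part1 := by
  intro sues _ hpre
  have h : ((PySem.Dict.mk sues).items.map (fun p => p.1)).Nodup := hpre.1
  unfold Spec_part1
  show part1 sues = part1_alt sues
  simp only [part1, part1_alt, foldl_stepA realSue (PySem.Dict.mk sues) h]
  generalize sues.filter (fun p => realSue.all fun kv => goodB p.2 kv.1 kv.2) = L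
  cases L <;> simp
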